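-- pv_equiv track=rewrite | github.com/MrBrantCode/unitest_baseline | mut_generate/mist_train_cf/cf_94650/solution.py | find_common_letters
-- ===== SOURCE A (Python) =====
-- def find_common_letters(str1, str2):
--     # Convert both strings to lowercase
--     str1 = str1.lower()
--     str2 = str2.lower()
--
--     # Initialize an empty dictionary to store the common letters and their frequencies
--     common_letters = {}
--
--     # Iterate over each character in the first string
--     for char in str1:
--         # Check if the character is a letter and if it is present in the second string
--         if char.isalpha() and char in str2:
--             # If the character is already in the dictionary, increment its frequency
--             if char in common_letters:
--                 common_letters[char] += 1
--             # If the character is not in the dictionary, add it with a frequency of 1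
--             else:
--                 common_letters[char] = 1
--
--     # Iterate over each character in the second string
--     for char in str2:
--         # Check if the character is a letter and if it is present in the first string
--         if char.isalpha() and char in str1:
--             # If the character is already in the dictionary, increment its frequency
--             if char in common_letters:
--                 common_letters[char] += 1
--             # If the character is not in the dictionary, add it with a frequency of 1
--             else:
--                 common_letters[char] = 1
--
--     # Return the dictionary of common letters and their frequencies
--     return common_letters
-- ===== SOURCE B (Python) =====
-- def find_common_letters(str1, str2):
--     # Dedup-then-count: list the distinct letters of str1.lower() in first-occurrence
--     # order, keep those that are letters present in str2.lower(), and read each count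
--     # off the concatenated character pool in one comprehension.
--     s1 = str1.lower()
--     s2 = str2.lower()
--     pool = list(s1) + list(s2)
--     return {c: pool.count(c)
--             for c in dict.fromkeys(s1)
--             if c.isalpha() and c in s2}
-- ===== Notes on version B (the rewrite author's own statement) =====
-- stated objective: simpler
-- what changed: A builds the dict incrementally in two scan loops, each testing membership in the other string and branching on whether the key is already present; B has no incremental dict at all: it dedups str1's lowered characters once (dict.fromkeys), filters them by the common-letter test, and maps each surviving letter to its count in the concatenated character pool.
import Mathlib
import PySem

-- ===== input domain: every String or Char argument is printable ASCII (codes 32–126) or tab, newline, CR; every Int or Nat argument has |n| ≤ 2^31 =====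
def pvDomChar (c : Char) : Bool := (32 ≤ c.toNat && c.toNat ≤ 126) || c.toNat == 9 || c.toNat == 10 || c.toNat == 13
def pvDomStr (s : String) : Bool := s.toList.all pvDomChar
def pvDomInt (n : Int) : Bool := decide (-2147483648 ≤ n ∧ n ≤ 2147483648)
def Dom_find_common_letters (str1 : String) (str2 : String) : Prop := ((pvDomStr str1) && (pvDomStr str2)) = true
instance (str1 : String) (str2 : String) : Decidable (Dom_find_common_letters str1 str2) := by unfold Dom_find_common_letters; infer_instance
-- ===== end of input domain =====

-- B replaces A's two incremental scan-and-update loops by a dedup of str1's lowered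
-- characters, a filter by the common-letter test, and a count over the concatenated pool.

-- ===== PORT A =====
-- dict keys are the 1-character strings Python iteration yields; modelled as Char inside the
-- loops and wrapped to a 1-character String at the return, exact for this code.
-- body of A after the two reassignments str1 = str1.lower(); str2 = str2.lower()
def pvA_core (s1 s2 : List Char) : List (String × Int) :=
  let d1 := s1.foldl (fun d c =>
      if PySem.Chars.isalpha c && PySem.Chars.isIn [c] s2 then
        (if d.contains c then d.insert c (d.getD c 0 + 1) else d.insert c 1)
      else d) (PySem.Dict.empty : PySem.Dict Char Int)
  let d2 := s2.foldl (fun d c =>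
      if PySem.Chars.isalpha c && PySem.Chars.isIn [c] s1 then
        (if d.contains c then d.insert c (d.getD c 0 + 1) else d.insert c 1)
      else d) d1
  d2.items.map (fun p => (String.ofList [p.1], p.2))

def find_common_letters (str1 : String) (str2 : String) : List (String × Int) :=
  pvA_core (PySem.Chars.lower str1.toList) (PySem.Chars.lower str2.toList)

-- ===== PORT B =====
-- body of B: dedup str1's letters (dict.fromkeys), filter, count in the pool.
-- 'pool.count(c)' on a Python list is element counting: List.count.
def find_common_letters_alt (str1 : String) (str2 : String) : List (String × Int) :=
  let s1 := PySem.Chars.lower str1.toList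
  let s2 := PySem.Chars.lower str2.toList
  let pool := s1 ++ s2
  ((PySem.List.dedup s1).filter
      (fun c => PySem.Chars.isalpha c && PySem.Chars.isIn [c] s2)).map
    (fun c => (String.ofList [c], (pool.count c : Int)))

-- ===== PRECONDITION & SPEC =====
def Spec_find_common_letters (str1 : String) (str2 : String) (out : List (String × Int)) : Prop := out = find_common_letters_alt str1 str2
instance (str1 : String) (str2 : String) (out : List (String × Int)) : Decidable (Spec_find_common_letters str1 str2 out) := by unfold Spec_find_common_letters; infer_instance

-- ===== CLAIM (what is proved, stated in full; the proofs are below) =====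
def Claim_equal_find_common_letters : Prop := ∀ (str1 : String) (str2 : String), Dom_find_common_letters str1 str2 → Spec_find_common_letters str1 str2 (find_common_letters str1 str2)

-- ===== LEMMAS AND PROOFS =====

-- the common-letter test A applies while scanning one string against the other
def pvGood (other : List Char) (c : Char) : Bool :=
  PySem.Chars.isalpha c && PySem.Chars.isIn [c] other

theorem pv_good_iff (other : List Char) (c : Char) :
    pvGood other c = true ↔ PySem.Chars.isalpha c = true ∧ c ∈ other := by
  simp [pvGood, PySem.Chars.isIn_iff_infix, List.singleton_infix_iff]

-- A's two-branch increment is one insert of getD+1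
theorem pv_body_merge (d : PySem.Dict Char Int) (c : Char) :
    (if d.contains c then d.insert c (d.getD c 0 + 1) else d.insert c 1)
      = d.insert c (d.getD c 0 + 1) := by
  cases h : d.contains c
  · rw [if_neg (by simp)]
    have h0 : d.getD c 0 = 0 := by simp [PySem.Dict.getD_of_not_contains (h := h)]
    rw [h0]
    norm_num
  · rw [if_pos rfl]

theorem pv_update_eq_self (l : List Char) : ∀ (s : PySem.Set Char),
    (∀ x ∈ l, x ∈ s) → PySem.Set.update s l = s := by
  induction l with
  | nil => intro s _; rfl
  | cons x t ih =>
    intro s h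
    have hx : x ∈ s := h x List.mem_cons_self
    show List.foldl PySem.Set.add s (x :: t) = s
    rw [List.foldl_cons, PySem.Set.add_of_mem hx]
    exact ih s (fun y hy => h y (List.mem_cons_of_mem _ hy))

theorem pv_ofList_append_singleton (t : List Char) (x : Char) :
    PySem.Set.ofList (t ++ [x]) = PySem.Set.add (PySem.Set.ofList t) x := by
  simp [PySem.Set.ofList_eq_foldl, List.foldl_append]

theorem pv_ofList_filter (p : Char → Bool) (xs : List Char) :
    PySem.Set.ofList (xs.filter p) = (PySem.Set.ofList xs).filter p := by
  induction xs using List.reverseRecOn with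
  | nil => rfl
  | append_singleton t x ih =>
    rw [List.filter_append, List.filter_singleton, pv_ofList_append_singleton]
    cases hp : p x
    · simp only [cond_false, List.append_nil, ih, PySem.Set.add_eq_ite]
      split
      · rfl
      · simp [List.filter_append, hp]
    · simp only [cond_true]
      rw [pv_ofList_append_singleton, ih]
      by_cases hx : x ∈ PySem.Set.ofList t
      · rw [PySem.Set.add_of_mem (List.mem_filter.2 ⟨hx, hp⟩), PySem.Set.add_of_mem hx]
      · rw [PySem.Set.add_of_not_mem (fun h => hx (List.mem_filter.1 h).1),
          PySem.Set.add_of_not_mem hx, List.filter_append, List.filter_singleton, hp, cond_true]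

-- the whole computation, at the level of the (lowered) character lists
theorem pv_main (l1 l2 : List Char) :
    pvA_core l1 l2
    =
    List.map (fun c => (String.ofList [c], ((l1 ++ l2).count c : Int)))
      (List.filter (fun c => PySem.Chars.isalpha c && PySem.Chars.isIn [c] l2)
        (PySem.List.dedup l1)) := by
  simp only [pvA_core]
  have hmerge : ∀ (other : List Char) (d : PySem.Dict Char Int) (c : Char),
      (if PySem.Chars.isalpha c && PySem.Chars.isIn [c] other then
        (if d.contains c then d.insert c (d.getD c 0 + 1) else d.insert c 1)
      else d) = (if pvGood other c then d.insert c (d.getD c 0 + 1) else d) := by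
    intro other d c
    rw [pv_body_merge]
    rfl
  -- A's two loops are counting loops over the filtered lists
  have hA1 : List.foldl (fun d c =>
        if PySem.Chars.isalpha c && PySem.Chars.isIn [c] l2 then
          (if d.contains c then d.insert c (d.getD c 0 + 1) else d.insert c 1)
        else d) (PySem.Dict.empty : PySem.Dict Char Int) l1
      = PySem.Dict.counter (l1.filter (pvGood l2)) := by
    simp only [hmerge]
    rw [PySem.List.foldl_if_eq_foldl_filter, PySem.Dict.foldl_insert_getD_add_one_eq_counter]
  rw [hA1]
  have hA2 : List.foldl (fun d c =>
        if PySem.Chars.isalpha c && PySem.Chars.isIn [c] l1 then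
          (if d.contains c then d.insert c (d.getD c 0 + 1) else d.insert c 1)
        else d) (PySem.Dict.counter (l1.filter (pvGood l2))) l2
      = List.foldl (fun d c => d.insert c (d.getD c 0 + 1))
          (PySem.Dict.counter (l1.filter (pvGood l2))) (l2.filter (pvGood l1)) := by
    simp only [hmerge]
    rw [PySem.List.foldl_if_eq_foldl_filter]
  rw [hA2]
  -- keys of the final A dict: exactly the distinct common letters of l1, in l1 order
  have hsub : ∀ x ∈ l2.filter (pvGood l1), x ∈ PySem.Set.ofList (l1.filter (pvGood l2)) := by
    intro x hx
    obtain ⟨hx2, hg⟩ := List.mem_filter.1 hx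
    obtain ⟨ha, hx1⟩ := (pv_good_iff l1 x).1 hg
    have : x ∈ l1.filter (pvGood l2) :=
      List.mem_filter.2 ⟨hx1, (pv_good_iff l2 x).2 ⟨ha, hx2⟩⟩
    exact (PySem.Set.mem_ofList _ _).2 this
  have hkeys : (List.foldl (fun d c => d.insert c (d.getD c 0 + 1))
        (PySem.Dict.counter (l1.filter (pvGood l2))) (l2.filter (pvGood l1))).keys
      = PySem.Set.ofList (l1.filter (pvGood l2)) := by
    rw [PySem.Dict.keys_foldl_insert, PySem.Dict.keys_counter]
    exact pv_update_eq_self _ _ hsub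
  have hnodup : (List.foldl (fun d c => d.insert c (d.getD c 0 + 1))
        (PySem.Dict.counter (l1.filter (pvGood l2))) (l2.filter (pvGood l1))).keys.Nodup :=
    PySem.Dict.nodup_keys_foldl_insert _ _ _ (PySem.Dict.nodup_keys_counter _)
  rw [PySem.Dict.items_eq_map_keys _ hnodup 0, hkeys]
  -- B's side: the filtered dedup is the key list of A's dict
  have hB : List.filter (fun c => PySem.Chars.isalpha c && PySem.Chars.isIn [c] l2)
        (PySem.List.dedup l1) = PySem.Set.ofList (l1.filter (pvGood l2)) := by
    rw [PySem.List.dedup_eq_ofList, pv_ofList_filter]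
    rfl
  rw [List.map_map, hB]
  -- both sides are maps over the same key list; compare pointwise
  apply List.map_congr_left
  intro k hk
  have hk1 : k ∈ l1.filter (pvGood l2) := (PySem.Set.mem_ofList _ _).1 hk
  obtain ⟨hkl1, hg2⟩ := List.mem_filter.1 hk1
  obtain ⟨ha, hkl2⟩ := (pv_good_iff l2 k).1 hg2
  have hg1 : pvGood l1 k = true := (pv_good_iff l1 k).2 ⟨ha, hkl1⟩
  have hc1 : (l1.filter (pvGood l2)).count k = l1.count k := List.count_filter hg2
  have hc2 : (l2.filter (pvGood l1)).count k = l2.count k := List.count_filter hg1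
  simp only [Function.comp, PySem.Dict.getD_foldl_insert_add_one, PySem.Dict.getD_counter,
    hc1, hc2, List.count_append]
  push_cast
  ring_nf

-- ===== VERDICT (by name: the statement is the Claim_ definition above) =====
theorem find_common_letters_spec : Claim_equal_find_common_letters := by
  intro str1 str2 _
  show find_common_letters str1 str2 = find_common_letters_alt str1 str2
  simp only [find_common_letters, find_common_letters_alt]
  exact pv_main (PySem.Chars.lower str1.toList) (PySem.Chars.lower str2.toList)
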